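-- pv_equiv track=rewrite | github.com/EldanGS/bversatile | Problems/companies/Facebook/Min_steps_to_remove_elements.py | min_steps_to_remove_elements
-- ===== SOURCE A (Python) =====
-- def min_steps_to_remove_elements(nums):
--     steps, stack = 0, []
--
--     for i in reversed(range(len(nums))):
--         if stack and nums[stack[-1]] > nums[i]:
--             steps += 1
--             while stack and nums[stack[-1]] > nums[i]:
--                 stack.pop()
--
--         stack.append(i)
--
--     return steps
-- ===== SOURCE B (Python) =====
-- def min_steps_to_remove_elements(nums):
--     # The stack top when processing i is always i+1, so the count equals the
--     # number of adjacent ascending pairs.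
--     steps = 0
--     for i in range(len(nums) - 1):
--         if nums[i + 1] > nums[i]:
--             steps += 1
--     return steps
-- ===== Notes on version B (the rewrite author's own statement) =====
-- stated objective: simpler
-- what changed: Drops the monotonic index stack entirely: since the stack top when processing i is always i+1, B just counts adjacent pairs with nums[i+1] > nums[i] in one forward pass.
import Mathlib
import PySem

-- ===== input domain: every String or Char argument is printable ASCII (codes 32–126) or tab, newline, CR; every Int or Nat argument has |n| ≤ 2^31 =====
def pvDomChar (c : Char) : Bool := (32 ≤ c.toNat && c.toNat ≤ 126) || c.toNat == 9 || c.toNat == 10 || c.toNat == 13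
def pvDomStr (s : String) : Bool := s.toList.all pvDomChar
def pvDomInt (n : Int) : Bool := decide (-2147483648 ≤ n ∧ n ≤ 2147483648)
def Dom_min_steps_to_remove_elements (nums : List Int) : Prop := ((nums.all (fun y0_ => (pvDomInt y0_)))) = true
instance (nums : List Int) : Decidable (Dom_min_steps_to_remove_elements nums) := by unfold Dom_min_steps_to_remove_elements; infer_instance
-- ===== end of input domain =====

-- B drops A's monotonic index stack and just counts adjacent ascending pairs; objective: simpler.

-- ===== PORT A =====
-- the inner `while stack and nums[stack[-1]] > nums[i]: stack.pop()` loop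
def popA (nums : List Int) (x : Int) : List Nat → List Nat
  | [] => []
  | j :: rest => if nums.getD j 0 > x then popA nums x rest else j :: rest

-- one iteration of A's for-loop; the stack is kept top-first (cons = append)
def stepA (nums : List Int) (st : Int × List Nat) (i : Nat) : Int × List Nat :=
  match st with
  | (steps, stack) =>
    if stack ≠ [] ∧ nums.getD (stack.headD 0) 0 > nums.getD i 0 then
      (steps + 1, i :: popA nums (nums.getD i 0) stack)
    else
      (steps, i :: stack)

def min_steps_to_remove_elements (nums : List Int) : Int :=
  ((List.range nums.length).reverse.foldl (stepA nums) (0, [])).1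

-- ===== PORT B =====
def min_steps_to_remove_elements_alt (nums : List Int) : Int :=
  (List.range (nums.length - 1)).foldl
    (fun steps i => if nums.getD (i + 1) 0 > nums.getD i 0 then steps + 1 else steps) 0

-- ===== PRECONDITION & SPEC =====
def Spec_min_steps_to_remove_elements (nums : List Int) (out : Int) : Prop := out = min_steps_to_remove_elements_alt nums
instance (nums : List Int) (out : Int) : Decidable (Spec_min_steps_to_remove_elements nums out) := by unfold Spec_min_steps_to_remove_elements; infer_instance

-- ===== CLAIM (what is proved, stated in full; the proofs are below) =====
def Claim_equal_min_steps_to_remove_elements : Prop := ∀ (nums : List Int), Dom_min_steps_to_remove_elements nums → Spec_min_steps_to_remove_elements nums (min_steps_to_remove_elements nums)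

-- ===== LEMMAS AND PROOFS =====

-- B's running count, as a function of how many indices have been processed
def cntB (nums : List Int) (m : Nat) : Int :=
  (List.range m).foldl
    (fun steps i => if nums.getD (i + 1) 0 > nums.getD i 0 then steps + 1 else steps) 0

theorem cntB_succ (nums : List Int) (m : Nat) :
    cntB nums (m + 1) =
      if nums.getD (m + 1) 0 > nums.getD m 0 then cntB nums m + 1 else cntB nums m := by
  simp [cntB, List.range_succ]

-- invariant: when A is about to process index m with stack top m+1, the rest of the
-- run adds exactly the number of adjacent ascents among indices 0..m
theorem key (nums : List Int) :
    ∀ (m : Nat) (steps : Int) (s' : List Nat),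
      (((List.range (m + 1)).reverse.foldl (stepA nums) (steps, (m + 1) :: s')).1 =
        steps + cntB nums (m + 1)) := by
  intro m
  induction m with
  | zero =>
    intro steps s'
    simp [stepA, cntB]
    split_ifs <;> simp_all
  | succ m ih =>
    intro steps s'
    have hrange : (List.range (m + 2)).reverse = (m + 1) :: (List.range (m + 1)).reverse := by
      simp [List.range_succ]
    rw [hrange, List.foldl_cons]
    by_cases h : nums[m+1]?.getD 0 < nums[m+2]?.getD 0
    · have hstep : stepA nums (steps, (m + 2) :: s') (m + 1) =
          (steps + 1, (m + 1) :: popA nums (nums.getD (m + 1) 0) ((m + 2) :: s')) := by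
        simp [stepA, List.getD, h]
      rw [hstep, ih, cntB_succ nums (m + 1)]
      simp [List.getD, h]
      omega
    · have hstep : stepA nums (steps, (m + 2) :: s') (m + 1) =
          (steps, (m + 1) :: (m + 2) :: s') := by
        simp [stepA, List.getD, h]
      rw [hstep, ih, cntB_succ nums (m + 1)]
      simp [List.getD, h]

-- ===== VERDICT (by name: the statement is the Claim_ definition above) =====
theorem min_steps_to_remove_elements_spec : Claim_equal_min_steps_to_remove_elements := by
  intro nums _
  show min_steps_to_remove_elements nums = min_steps_to_remove_elements_alt nums
  unfold min_steps_to_remove_elements min_steps_to_remove_elements_alt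
  match hn : nums.length with
  | 0 => simp
  | 1 => simp [stepA]
  | (m + 2) =>
    have hrange : (List.range (m + 2)).reverse = (m + 1) :: (List.range (m + 1)).reverse := by
      simp [List.range_succ]
    rw [hrange, List.foldl_cons]
    have hstep : stepA nums ((0 : Int), ([] : List Nat)) (m + 1) = (0, [m + 1]) := by
      simp [stepA]
    rw [hstep]
    have := key nums m 0 []
    rw [this]
    simp [cntB]
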